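-- pv_equiv track=rewrite | github.com/RDK7159357/OS-python- | week1/3.py | calculate_total_time
-- ===== SOURCE A (Python) =====
-- from collections import deque
--
-- def calculate_total_time(orders, time_quantum):
--     orders_deque = deque(orders)
--     total_time = 0
--
--     while orders_deque:
--         order = orders_deque[0]
--         if order <= time_quantum:
--             total_time += order
--             orders_deque.popleft()
--         else:
--             total_time += time_quantum
--             orders_deque[0] -= time_quantum
--
--     return total_time
-- ===== SOURCE B (Python) =====
-- def calculate_total_time(orders, time_quantum):
--     # Round-robin charges each order exactly its full processing time in total,
--     # so the answer is simply the sum of the orders.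
--     return sum(orders)
-- ===== Notes on version B (the rewrite author's own statement) =====
-- stated objective: faster
-- what changed: Replaces the deque-based round-robin simulation (which loops once per quantum slice) with a closed form: the total time is just sum(orders).
import Mathlib
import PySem

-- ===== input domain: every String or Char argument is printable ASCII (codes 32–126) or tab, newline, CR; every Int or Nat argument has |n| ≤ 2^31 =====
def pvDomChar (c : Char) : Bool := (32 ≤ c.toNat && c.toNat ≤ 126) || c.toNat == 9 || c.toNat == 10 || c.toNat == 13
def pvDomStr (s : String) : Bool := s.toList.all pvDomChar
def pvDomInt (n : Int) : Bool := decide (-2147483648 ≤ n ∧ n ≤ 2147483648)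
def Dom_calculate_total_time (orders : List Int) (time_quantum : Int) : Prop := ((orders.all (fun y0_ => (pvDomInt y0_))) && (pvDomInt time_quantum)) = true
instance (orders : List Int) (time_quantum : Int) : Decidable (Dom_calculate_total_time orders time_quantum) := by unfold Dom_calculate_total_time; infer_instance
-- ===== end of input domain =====

-- B replaces A's per-quantum round-robin simulation with the closed form sum(orders);
-- Pre_ excludes inputs where A's while-loop never terminates (time_quantum ≤ 0 with some order above it).


-- ===== PORT A =====
-- A's while-loop over the deque, step for step. The `time_quantum ≤ 0` check in the
-- else-branch is ONLY a totality guard: there Python's loop never terminates (outside Pre_),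
-- and the port returns the accumulator; it never fires inside Pre_.
def calculate_total_time_go (total : Int) (orders : List Int) (time_quantum : Int) : Int :=
  match orders with
  | [] => total
  | order :: rest =>
      if order ≤ time_quantum then
        calculate_total_time_go (total + order) rest time_quantum
      else if time_quantum ≤ 0 then
        total
      else
        calculate_total_time_go (total + time_quantum) ((order - time_quantum) :: rest) time_quantum
termination_by (orders.length, (orders.headD 0).toNat)
decreasing_by
  · exact Prod.Lex.left _ _ (by simp)
  · apply Prod.Lex.right
    simp only [List.headD_cons]
    omega

def calculate_total_time (orders : List Int) (time_quantum : Int) : Int :=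
  calculate_total_time_go 0 orders time_quantum

-- ===== PORT B =====
def calculate_total_time_alt (orders : List Int) (time_quantum : Int) : Int :=
  orders.sum

-- ===== PRECONDITION & SPEC =====
-- Pre_ excludes exactly the inputs on which A never returns: when time_quantum ≤ 0 and
-- some order exceeds it, A's while-loop runs forever (the head never shrinks below the quantum).
def Pre_calculate_total_time (orders : List Int) (time_quantum : Int) : Prop :=
  0 < time_quantum ∨ ∀ o ∈ orders, o ≤ time_quantum
instance (orders : List Int) (time_quantum : Int) : Decidable (Pre_calculate_total_time orders time_quantum) := by unfold Pre_calculate_total_time; infer_instance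

def pvWitness_calculate_total_time : List Int × Int := ([5, 3, 8], 2)

def Spec_calculate_total_time (orders : List Int) (time_quantum : Int) (out : Int) : Prop := out = calculate_total_time_alt orders time_quantum
instance (orders : List Int) (time_quantum : Int) (out : Int) : Decidable (Spec_calculate_total_time orders time_quantum out) := by unfold Spec_calculate_total_time; infer_instance

-- ===== CLAIM (what is proved, stated in full; the proofs are below) =====
def Claim_equal_calculate_total_time : Prop := ∀ (orders : List Int) (time_quantum : Int), Dom_calculate_total_time orders time_quantum → Pre_calculate_total_time orders time_quantum → Spec_calculate_total_time orders time_quantum (calculate_total_time orders time_quantum)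

-- ===== LEMMAS AND PROOFS =====

theorem calculate_total_time_go_sum (total : Int) (orders : List Int) (time_quantum : Int)
    (h : Pre_calculate_total_time orders time_quantum) :
    calculate_total_time_go total orders time_quantum = total + orders.sum := by
  induction total, orders using calculate_total_time_go.induct (time_quantum := time_quantum) with
  | case1 total => simp [calculate_total_time_go]
  | case2 total o rest hle ih =>
      rw [calculate_total_time_go]
      simp only [hle, if_pos]
      rw [ih]
      · simp only [List.sum_cons]; ring
      · rcases h with h | h
        · exact Or.inl h
        · exact Or.inr fun x hx => h x (List.mem_cons_of_mem _ hx)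
  | case3 total o rest hgt hq0 =>
      exfalso
      rcases h with h | h
      · omega
      · exact hgt (h o List.mem_cons_self)
  | case4 total o rest hgt hq0 ih =>
      rw [calculate_total_time_go]
      rw [if_neg hgt, if_neg hq0]
      rw [ih]
      · simp only [List.sum_cons]; ring
      · exact Or.inl (by omega)

-- ===== VERDICT (by name: the statement is the Claim_ definition above) =====
theorem calculate_total_time_spec : Claim_equal_calculate_total_time := by
  intro orders tq _ hpre
  unfold Spec_calculate_total_time calculate_total_time calculate_total_time_alt
  rw [calculate_total_time_go_sum 0 orders tq hpre]
  simp
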